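-- pv_equiv track=rewrite | github.com/AJOsmaston/AdventOfCode2024 | src/day_03.py | generate_substrings
-- ===== SOURCE A (Python) =====
-- def generate_substrings(start_flags, stop_flags, input_string):
--     if len(stop_flags) == 0:
--         return [input_string]
--     current_index = 0
--
--     substrings = []
--
--     while current_index < len(input_string):
--         for start_flag in start_flags:
--             if start_flag >= current_index:
--                 start_index = start_flag
--                 current_index = start_flag
--                 break
--         for stop_flag in stop_flags:
--             if stop_flag > start_index and stop_flag > current_index:
--                 stop_index = stop_flag
--                 current_index = stop_flag
--                 break
--         substrings.append(input_string[start_index:stop_index])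
--
--     return substrings
-- ===== SOURCE B (Python) =====
-- def generate_substrings(start_flags, stop_flags, input_string):
--     if not stop_flags:
--         return [input_string]
--     n = len(input_string)
--     substrings = []
--     i = 0
--     j = 0
--     current = 0
--     start = 0
--     while current < n:
--         # advance the start pointer past flags already behind us; take the next one
--         while i < len(start_flags) and start_flags[i] < current:
--             i += 1
--         if i < len(start_flags):
--             start = start_flags[i]
--             current = start
--         # advance the stop pointer to the first flag strictly ahead and consume it
--         while j < len(stop_flags) and stop_flags[j] <= current:
--             j += 1
--         stop = stop_flags[j]
--         current = stop
--         j += 1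
--         substrings.append(input_string[start:stop])
--     return substrings
-- ===== Notes on version B (the rewrite author's own statement) =====
-- stated objective: faster
-- what changed: Replaces A's per-iteration rescans of both flag lists from the beginning with two monotone pointers that each advance through their list exactly once.
-- outside the precondition, e.g. on generate_substrings([1, 5], [2, 1], 'abc'): A returns ['b', ''], B raises IndexError; on generate_substrings([0, 7], [5], 'abcde'): A returns ['abcde'], B returns ['abcde']
import Mathlib
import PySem

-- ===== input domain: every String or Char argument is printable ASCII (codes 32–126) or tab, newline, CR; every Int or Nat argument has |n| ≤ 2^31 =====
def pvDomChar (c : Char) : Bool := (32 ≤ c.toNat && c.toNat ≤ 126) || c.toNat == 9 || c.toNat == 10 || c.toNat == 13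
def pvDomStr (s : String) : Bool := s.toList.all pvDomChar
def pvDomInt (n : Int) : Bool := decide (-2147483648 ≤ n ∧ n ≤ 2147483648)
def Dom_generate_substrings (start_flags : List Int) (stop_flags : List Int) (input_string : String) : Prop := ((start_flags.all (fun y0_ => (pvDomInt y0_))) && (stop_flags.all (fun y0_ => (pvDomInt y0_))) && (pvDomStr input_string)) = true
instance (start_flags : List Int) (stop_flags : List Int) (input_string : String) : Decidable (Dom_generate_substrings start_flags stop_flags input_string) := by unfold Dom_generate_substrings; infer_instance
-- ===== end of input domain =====

-- B replaces A's per-iteration rescans of both flag lists with two monotone pointers that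
-- advance once through each list (objective: faster).

-- ===== PORT A =====
-- the first for-loop with break: first start_flag ≥ current, returning (start_index, current_index)
def gsStartScanA (start_flags : List Int) (current start_index : Int) : Int × Int :=
  match start_flags.find? (fun f => decide (current ≤ f)) with
  | some f => (f, f)
  | none => (start_index, current)

-- the second for-loop with break: first stop_flag > start_index and > current, returning (stop_index, current_index)
def gsStopScanA (stop_flags : List Int) (start_index current stop_index : Int) : Int × Int :=
  match stop_flags.find? (fun g => decide (start_index < g) && decide (current < g)) with
  | some g => (g, g)
  | none => (stop_index, current)

-- A's while loop, transliterated with a fuel counter; within Pre_ the current index strictly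
-- increases each iteration, so fuel (len + 1) is never exhausted there.  start_index /
-- stop_index are modelled as Ints initialised to 0; within Pre_ they are assigned before
-- use (Python raises NameError otherwise, excluded by Pre_).
def gsLoopA (start_flags : List Int) (stop_flags : List Int) (input_string : String) :
    Nat → Int → Int → Int → List String → List String
  | 0, _, _, _, acc => acc.reverse
  | fuel + 1, current, start_index, stop_index, acc =>
    if current < PySem.Str.len input_string then
      let p1 := gsStartScanA start_flags current start_index
      let p2 := gsStopScanA stop_flags p1.1 p1.2 stop_index
      gsLoopA start_flags stop_flags input_string fuel p2.2 p1.1 p2.1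
        (PySem.Str.slice input_string (some p1.1) (some p2.1) :: acc)
    else acc.reverse

def generate_substrings (start_flags : List Int) (stop_flags : List Int) (input_string : String) : List String :=
  if stop_flags.length = 0 then [input_string]
  else gsLoopA start_flags stop_flags input_string ((PySem.Str.len input_string).toNat + 1) 0 0 0 []

-- ===== PORT B =====
-- Source B's index pointers i / j are transcribed as the suffixes ss / ts of the two flag lists;
-- the inner advancing whiles are dropWhile.  When the stop pointer runs out Python raises
-- IndexError (outside Pre_); the port returns the accumulator there.
def gsLoopB (input_string : String) (n : Int) :
    List Int → List Int → Int → Int → List String → List String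
  | ss, ts, current, start, acc =>
    if current < n then
      let ss' := ss.dropWhile (fun f => decide (f < current))
      let start' := match ss' with | f :: _ => f | [] => start
      let current' := match ss' with | f :: _ => f | [] => current
      match h : ts.dropWhile (fun g => decide (g ≤ current')) with
      | [] => acc.reverse   -- Python: IndexError (excluded by Pre_)
      | g :: rest =>
        gsLoopB input_string n ss' rest g start'
          (PySem.Str.slice input_string (some start') (some g) :: acc)
    else acc.reverse
  termination_by _ ts _ _ _ => ts.length
  decreasing_by
    have hle := List.length_dropWhile_le (fun g => decide (g ≤ current')) ts
    rw [h] at hle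
    simpa using Nat.lt_of_lt_of_le (Nat.lt_succ_self _) hle

def generate_substrings_alt (start_flags : List Int) (stop_flags : List Int) (input_string : String) : List String :=
  if stop_flags = [] then [input_string]
  else gsLoopB input_string (PySem.Str.len input_string) start_flags stop_flags 0 0 []

-- ===== PRECONDITION & SPEC =====
-- Pre_ excludes the inputs on which A raises NameError (an unassigned start/stop index),
-- loops forever, or terminates only through a stale stop index left over from an earlier
-- iteration (there B raises IndexError); the flag-coverage conjunct is slightly conservative
-- and also excludes some inputs whose unusable out-of-range flags A never selects, on which
-- A and B agree.
def Pre_generate_substrings (start_flags : List Int) (stop_flags : List Int) (input_string : String) : Prop :=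
  stop_flags = [] ∨ PySem.Str.len input_string = 0 ∨
    ((∃ f ∈ start_flags, 0 ≤ f) ∧
     (∃ g ∈ stop_flags, PySem.Str.len input_string ≤ g) ∧
     (∀ f ∈ start_flags, 0 ≤ f → ∃ g ∈ stop_flags, f < g))
instance (start_flags : List Int) (stop_flags : List Int) (input_string : String) : Decidable (Pre_generate_substrings start_flags stop_flags input_string) := by unfold Pre_generate_substrings; infer_instance

def pvWitness_generate_substrings : List Int × List Int × String := ([0, 2], [2, 4], "abcd")

def Spec_generate_substrings (start_flags : List Int) (stop_flags : List Int) (input_string : String) (out : List String) : Prop := out = generate_substrings_alt start_flags stop_flags input_string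
instance (start_flags : List Int) (stop_flags : List Int) (input_string : String) (out : List String) : Decidable (Spec_generate_substrings start_flags stop_flags input_string out) := by unfold Spec_generate_substrings; infer_instance

-- ===== CLAIM (what is proved, stated in full; the proofs are below) =====
def Claim_equal_generate_substrings : Prop := ∀ (start_flags : List Int) (stop_flags : List Int) (input_string : String), Dom_generate_substrings start_flags stop_flags input_string → Pre_generate_substrings start_flags stop_flags input_string → Spec_generate_substrings start_flags stop_flags input_string (generate_substrings start_flags stop_flags input_string)

-- ===== LEMMAS AND PROOFS =====

-- find? is the head of the dropWhile of the negated predicate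
theorem pv_find?_eq_head?_dropWhile {α : Type} (p : α → Bool) (l : List α) :
    l.find? p = (l.dropWhile (fun x => ! p x)).head? := by
  induction l with
  | nil => rfl
  | cons a t ih => by_cases h : p a <;> simp [List.dropWhile_cons, h, ih]

-- find? skips a prefix on which p fails
theorem pv_find?_append_fail {α : Type} (p : α → Bool) (l₁ l₂ : List α)
    (h : ∀ x ∈ l₁, p x = false) : (l₁ ++ l₂).find? p = l₂.find? p := by
  induction l₁ with
  | nil => rfl
  | cons a t ih =>
    simp only [List.cons_append, List.find?_cons, h a (by simp)]
    exact ih (fun x hx => h x (by simp [hx]))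

-- one unfolding step of gsLoopB in the running case, with the matches non-dependent
theorem pv_gsLoopB_step (s : String) (n : Int) (ss ts : List Int) (current start : Int)
    (acc : List String) (hcn : current < n) :
    gsLoopB s n ss ts current start acc =
      (match ss.dropWhile (fun f => decide (f < current)) with
       | f :: _ =>
         (match ts.dropWhile (fun g => decide (g ≤ f)) with
          | [] => acc.reverse
          | g :: rest => gsLoopB s n (ss.dropWhile (fun f => decide (f < current))) rest g f
              (PySem.Str.slice s (some f) (some g) :: acc))
       | [] =>
         (match ts.dropWhile (fun g => decide (g ≤ current)) with
          | [] => acc.reverse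
          | g :: rest => gsLoopB s n [] rest g start
              (PySem.Str.slice s (some start) (some g) :: acc))) := by
  rw [gsLoopB, if_pos hcn]
  rcases h2 : ss.dropWhile (fun f => decide (f < current)) with _ | ⟨f, tl⟩
  · rcases h3 : ts.dropWhile (fun g => decide (g ≤ current)) with _ | ⟨g, rest⟩ <;>
      simp only [h2, h3] <;> split <;> simp_all
  · rcases h3 : ts.dropWhile (fun g => decide (g ≤ f)) with _ | ⟨g, rest⟩ <;>
      simp only [h2, h3] <;> split <;> simp_all

-- A's start scan, computed from the pointer suffix ss
theorem pv_startScan_eq (sf ss ps : List Int) (current start : Int)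
    (hps : sf = ps ++ ss) (hlt : ∀ f ∈ ps, f < current) :
    gsStartScanA sf current start =
      (match ss.dropWhile (fun f => decide (f < current)) with
       | f :: _ => (f, f)
       | [] => (start, current)) := by
  have hpred : (fun f : Int => ! decide (current ≤ f)) = (fun f : Int => decide (f < current)) := by
    funext f; by_cases h : current ≤ f <;> simp [h] <;> omega
  have hfind : sf.find? (fun f => decide (current ≤ f)) =
      (ss.dropWhile (fun f => decide (f < current))).head? := by
    rw [hps, pv_find?_append_fail _ _ _ (fun x hx => by simpa using not_le.mpr (hlt x hx)),
      pv_find?_eq_head?_dropWhile, hpred]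
  rw [gsStartScanA, hfind]
  rcases ss.dropWhile (fun f => decide (f < current)) with _ | ⟨f, tl⟩ <;> rfl

-- A's stop scan, computed from the pointer suffix ts: under the invariants it finds the
-- head of B's dropWhile, which exists
theorem pv_stopScan_eq (tf ts pt : List Int) (current' start' stop : Int)
    (hpt : tf = pt ++ ts) (hle : ∀ g ∈ pt, g ≤ current') (hsc : start' ≤ current')
    (hwit : ∃ g ∈ tf, current' < g) :
    ∃ g₀ rest, ts.dropWhile (fun g => decide (g ≤ current')) = g₀ :: rest ∧
      gsStopScanA tf start' current' stop = (g₀, g₀) ∧ current' < g₀ := by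
  have hpred : (fun g : Int => decide (start' < g) && decide (current' < g)) =
      (fun g : Int => decide (current' < g)) := by
    funext g; by_cases h : current' < g
    · simp [h]; omega
    · simp [h]
  have hpred2 : (fun g : Int => ! decide (current' < g)) = (fun g : Int => decide (g ≤ current')) := by
    funext g; by_cases h : current' < g <;> simp [h] <;> omega
  have hfind : tf.find? (fun g => decide (current' < g)) =
      (ts.dropWhile (fun g => decide (g ≤ current'))).head? := by
    rw [hpt, pv_find?_append_fail _ _ _ (fun x hx => by simpa using not_lt.mpr (hle x hx)),
      pv_find?_eq_head?_dropWhile, hpred2]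
  have hsome : (tf.find? (fun g => decide (current' < g))).isSome := by
    rw [List.find?_isSome]
    obtain ⟨g, hg, hgt⟩ := hwit
    exact ⟨g, hg, by simpa using hgt⟩
  rcases hdrop : ts.dropWhile (fun g => decide (g ≤ current')) with _ | ⟨g₀, rest⟩
  · rw [hfind, hdrop] at hsome; simp at hsome
  · refine ⟨g₀, rest, rfl, ?_, ?_⟩
    · rw [gsStopScanA, hpred, hfind, hdrop]; rfl
    · have hfg : tf.find? (fun g => decide (current' < g)) = some g₀ := by
        rw [hfind, hdrop]; rfl
      simpa using List.find?_some hfg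

-- main loop equivalence under the pointer invariants
theorem pv_loop_eq (s : String) (sf tf : List Int)
    (Hg : ∃ g ∈ tf, PySem.Str.len s ≤ g)
    (Hf : ∀ f ∈ sf, 0 ≤ f → ∃ g ∈ tf, f < g) :
    ∀ (fuel : Nat) (ss ts : List Int) (current start stop : Int) (acc : List String),
    (∃ ps, sf = ps ++ ss ∧ ∀ f ∈ ps, f < current) →
    (∃ pt, tf = pt ++ ts ∧ ∀ g ∈ pt, g ≤ current) →
    start ≤ current → 0 ≤ current →
    (PySem.Str.len s).toNat ≤ current.toNat + fuel →
    gsLoopA sf tf s fuel current start stop acc =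
      gsLoopB s (PySem.Str.len s) ss ts current start acc := by
  intro fuel
  induction fuel with
  | zero =>
    intro ss ts current start stop acc _ _ _ hc0 hfuel
    have hn : ¬ current < PySem.Str.len s := by omega
    rw [gsLoopB, if_neg hn]
    rfl
  | succ fuel ih =>
    intro ss ts current start stop acc hss hts hsc hc0 hfuel
    obtain ⟨ps, hps, hpslt⟩ := hss
    obtain ⟨pt, hpt, hptle⟩ := hts
    by_cases hcn : current < PySem.Str.len s
    · have hstart := pv_startScan_eq sf ss ps current start hps hpslt
      -- name the values after the start scan
      rcases hss' : ss.dropWhile (fun f => decide (f < current)) with _ | ⟨f, tl⟩ <;>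
        rw [hss'] at hstart
      · -- no start flag ≥ current: start and current are kept
        obtain ⟨g₀, rest, hdrop, hscan, hg₀gt⟩ :=
          pv_stopScan_eq tf ts pt current start stop hpt hptle hsc
            (by obtain ⟨g, hg, hgn⟩ := Hg; exact ⟨g, hg, by omega⟩)
        rw [gsLoopA, if_pos hcn]
        simp only [hstart, hscan]
        rw [pv_gsLoopB_step s _ ss ts current start acc hcn]
        simp only [hss', hdrop]
        apply ih
        · refine ⟨ps ++ ss, by simp [hps], ?_⟩
          intro x hx
          rcases List.mem_append.mp hx with hx | hx
          · exact lt_trans (hpslt x hx) hg₀gt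
          · have : x ∈ ss.takeWhile (fun f => decide (f < current)) := by
              rw [← List.takeWhile_append_dropWhile (p := fun f : Int => decide (f < current)) (l := ss)] at hx
              rcases List.mem_append.mp hx with h | h
              · exact h
              · rw [hss'] at h; simp at h
            have := List.mem_takeWhile_imp this
            simp at this; omega
        · refine ⟨pt ++ (ts.takeWhile (fun g => decide (g ≤ current)) ++ [g₀]), ?_, ?_⟩
          · rw [hpt]
            have := List.takeWhile_append_dropWhile (p := fun g : Int => decide (g ≤ current)) (l := ts)
            rw [hdrop] at this
            conv_lhs => rw [← this]
            simp
          · intro x hx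
            simp only [List.mem_append, List.mem_singleton] at hx
            rcases hx with hx | hx | hx
            · exact le_of_lt (lt_of_le_of_lt (hptle x hx) hg₀gt)
            · have := List.mem_takeWhile_imp hx; simp at this; omega
            · omega
        · omega
        · omega
        · omega
      · -- start flag f ≥ current found
        have hf_mem : f ∈ sf := by
          rw [hps]
          refine List.mem_append_right _ ((List.dropWhile_sublist (p := fun f : Int => decide (f < current)) (l := ss)).subset ?_)
          rw [hss']; simp
        have hf_ge : current ≤ f := by
          have hne : ss.dropWhile (fun f : Int => decide (f < current)) ≠ [] := by simp [hss']
          have h1 := List.head_dropWhile_not (fun x : Int => decide (x < current)) hne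
          have h2 : (ss.dropWhile (fun f : Int => decide (f < current))).head? = some f := by
            rw [hss']; rfl
          rw [List.head?_eq_head hne] at h2
          simp only [Option.some.injEq] at h2
          rw [h2] at h1
          simp at h1; omega
        obtain ⟨g₀, rest, hdrop, hscan, hg₀gt⟩ :=
          pv_stopScan_eq tf ts pt f f stop hpt
            (fun g hg => le_trans (hptle g hg) hf_ge) le_rfl
            (Hf f hf_mem (by omega))
        rw [gsLoopA, if_pos hcn]
        simp only [hstart, hscan]
        rw [pv_gsLoopB_step s _ ss ts current start acc hcn]
        simp only [hss', hdrop]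
        apply ih
        · refine ⟨ps ++ ss.takeWhile (fun f => decide (f < current)), ?_, ?_⟩
          · rw [hps]
            have := List.takeWhile_append_dropWhile (p := fun f : Int => decide (f < current)) (l := ss)
            rw [hss'] at this
            conv_lhs => rw [← this]
            simp
          · intro x hx
            rcases List.mem_append.mp hx with hx | hx
            · have := hpslt x hx; omega
            · have := List.mem_takeWhile_imp hx; simp at this; omega
        · refine ⟨pt ++ (ts.takeWhile (fun g => decide (g ≤ f)) ++ [g₀]), ?_, ?_⟩
          · rw [hpt]
            have := List.takeWhile_append_dropWhile (p := fun g : Int => decide (g ≤ f)) (l := ts)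
            rw [hdrop] at this
            conv_lhs => rw [← this]
            simp
          · intro x hx
            simp only [List.mem_append, List.mem_singleton] at hx
            rcases hx with hx | hx | hx
            · have := hptle x hx; omega
            · have := List.mem_takeWhile_imp hx; simp at this; omega
            · omega
        · omega
        · omega
        · omega
    · rw [gsLoopB, if_neg hcn]
      rw [gsLoopA, if_neg hcn]

-- ===== VERDICT (by name: the statement is the Claim_ definition above) =====
theorem generate_substrings_spec : Claim_equal_generate_substrings := by
  intro sf tf s _ hpre
  unfold Spec_generate_substrings
  rcases hpre with htf | hn0 | ⟨_, Hg, Hf⟩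
  · subst htf; rfl
  · rw [generate_substrings, generate_substrings_alt]
    by_cases htf : tf = []
    · simp [htf]
    · rw [if_neg (by simpa using htf), if_neg htf]
      have h1 : ¬ (0:Int) < PySem.Str.len s := by omega
      rw [gsLoopB, if_neg h1]
      rw [PySem.Str.len_eq] at hn0
      have h2 : s.length = 0 := by exact_mod_cast hn0
      simp [gsLoopA, h2]
  · have htf : tf ≠ [] := by rintro rfl; simp at Hg
    rw [generate_substrings, generate_substrings_alt, if_neg (by simpa using htf), if_neg htf]
    refine pv_loop_eq s sf tf Hg Hf _ sf tf 0 0 0 []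
      ⟨[], by simp, by simp⟩ ⟨[], by simp, by simp⟩ le_rfl le_rfl ?_
    simp
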